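-- pv_equiv track=rewrite | github.com/xuhaolei/GDReBase_crawler | public.py | transformDate
-- ===== SOURCE A (Python) =====
-- def transformDate(day,month,year):
--     dic = {"January":"01","February":"02","March":"03","April":"04","May":"05","June":"06","July":"07","August":"08","September":"09","October":"10","November":"11","December":"12"}
--     dic2 = {"Jan":"01","Feb":"02","Mar":"03","Apr":"04","May":"05","Jun":"06","Jul":"07","Aug":"08","Sep":"09","Oct":"10","Nov":"11","Dec":"12"}
--     keys = list(dic.keys())
--     for key in keys:
--         dic[key.lower()] = dic[key]
--     keys = list(dic2.keys())
--     for key in keys: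
--         dic2[key.lower()] = dic2[key]
--
--     month1 = dic.get(month.lower())
--     if month1 == None:
--         month1 = dic2.get(month.lower())
--     if month1 == None:
--         month1 = "01" # 如果两个字典都找不到就是none
--     return year+"-"+month1+"-"+day
-- ===== SOURCE B (Python) =====
-- def transformDate(day, month, year):
--     months = ["January", "February", "March", "April", "May", "June",
--               "July", "August", "September", "October", "November", "December"]
--     m = month.lower()
--     month1 = "01"
--     for i, name in enumerate(months):
--         if m == name.lower() or m == name[:3].lower():
--             month1 = "%02d" % (i + 1)
--             break
--     return year + "-" + month1 + "-" + day
-- ===== Notes on version B (the rewrite author's own statement) =====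
-- stated objective: simpler
-- what changed: A builds two 12-entry dicts, doubles each with a lowercasing loop and does two sequential .get lookups; B keeps one ordered list of the twelve month names and scans it once, matching month.lower() against name.lower() and name[:3].lower() and deriving the number from the index.
import Mathlib
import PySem

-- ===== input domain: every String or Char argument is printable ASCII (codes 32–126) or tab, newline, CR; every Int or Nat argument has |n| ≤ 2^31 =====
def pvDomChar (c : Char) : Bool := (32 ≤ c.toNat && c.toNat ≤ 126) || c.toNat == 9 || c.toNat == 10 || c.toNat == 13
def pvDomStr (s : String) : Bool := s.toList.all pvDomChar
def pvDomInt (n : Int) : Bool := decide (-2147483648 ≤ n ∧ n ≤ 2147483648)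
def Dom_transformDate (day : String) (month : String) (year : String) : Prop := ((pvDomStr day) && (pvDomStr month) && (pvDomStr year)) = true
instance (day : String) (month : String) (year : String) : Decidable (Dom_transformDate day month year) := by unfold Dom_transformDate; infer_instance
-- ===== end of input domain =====

-- B replaces A's two month dictionaries (each doubled by a lowercasing loop) with a single
-- ordered list of the twelve month names scanned once, deriving the number from the index
-- (objective: simpler). A is total; return values agree on all inputs.

-- ===== PORT A =====
-- dic = {...} then the loop 'for key in keys: dic[key.lower()] = dic[key]' (the dicts are
-- input-independent, so they are built as constants; 'dic[key]' is (get? k).getD "", exact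
-- because every key of the keys list is present in the dict).
def pvDic0 : PySem.Dict String String := PySem.Dict.ofList [("January","01"), ("February","02"), ("March","03"), ("April","04"), ("May","05"), ("June","06"), ("July","07"), ("August","08"), ("September","09"), ("October","10"), ("November","11"), ("December","12")]
def pvDic2_0 : PySem.Dict String String := PySem.Dict.ofList [("Jan","01"), ("Feb","02"), ("Mar","03"), ("Apr","04"), ("May","05"), ("Jun","06"), ("Jul","07"), ("Aug","08"), ("Sep","09"), ("Oct","10"), ("Nov","11"), ("Dec","12")]
def pvDicA : PySem.Dict String String := pvDic0.keys.foldl (fun d k => d.insert (PySem.Str.lower k) ((d.get? k).getD "")) pvDic0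
def pvDic2A : PySem.Dict String String := pvDic2_0.keys.foldl (fun d k => d.insert (PySem.Str.lower k) ((d.get? k).getD "")) pvDic2_0

def transformDate (day : String) (month : String) (year : String) : String :=
  let month1 := pvDicA.get? (PySem.Str.lower month)
  let month1 := match month1 with
    | none => pvDic2A.get? (PySem.Str.lower month)
    | some v => some v
  let month1 := match month1 with
    | none => "01"
    | some v => v
  year ++ "-" ++ month1 ++ "-" ++ day

-- ===== PORT B =====
-- the for-loop with break over enumerate(months); '%02d' % (i+1) is zfill 2 of str(i+1),
-- exact since i+1 is positive here.
def pvMonths : List String := ["January", "February", "March", "April", "May", "June", "July", "August", "September", "October", "November", "December"]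

def pvScan (m : String) : List (Int × String) → String
  | [] => "01"
  | (i, name) :: rest =>
      if m == PySem.Str.lower name || m == PySem.Str.lower (PySem.Str.slice name none (some 3)) then
        PySem.Str.zfill (PySem.Int.toStr (i + 1)) 2
      else pvScan m rest

def transformDate_alt (day : String) (month : String) (year : String) : String :=
  let m := PySem.Str.lower month
  let month1 := pvScan m (PySem.List.enumerate pvMonths 0)
  year ++ "-" ++ month1 ++ "-" ++ day

-- ===== PRECONDITION & SPEC =====
def Spec_transformDate (day : String) (month : String) (year : String) (out : String) : Prop := out = transformDate_alt day month year
instance (day : String) (month : String) (year : String) (out : String) : Decidable (Spec_transformDate day month year out) := by unfold Spec_transformDate; infer_instance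

-- ===== CLAIM (what is proved, stated in full; the proofs are below) =====
def Claim_equal_transformDate : Prop := ∀ (day : String) (month : String) (year : String), Dom_transformDate day month year → Spec_transformDate day month year (transformDate day month year)

-- ===== LEMMAS AND PROOFS =====

-- a lowercased character is never an uppercase ASCII letter
theorem pv_isupper_false_of_gt (x : Char) (hx : 90 < x.toNat) : PySem.Chars.isupper x = false := by
  simp only [PySem.Chars.isupper, Bool.and_eq_false_iff, decide_eq_false_iff_not]
  right
  intro hle
  rw [Char.le_def] at hle
  have h1 : x.val.toNat ≤ ('Z').val.toNat := UInt32.le_iff_toNat_le.mp hle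
  have h2 : ('Z').val.toNat = 90 := by decide
  have h3 : x.toNat = x.val.toNat := rfl
  omega

theorem pv_lowerChar_not_upper (c : Char) : PySem.Chars.isupper (PySem.Chars.lowerChar c) = false := by
  simp only [PySem.Chars.lowerChar]
  by_cases h : PySem.Chars.isupper c = true
  · rw [if_pos h]
    have hb : 65 ≤ c.toNat ∧ c.toNat ≤ 90 := by
      simp only [PySem.Chars.isupper, Bool.and_eq_true, decide_eq_true_eq, Char.le_def] at h
      have h1 := UInt32.le_iff_toNat_le.mp h.1
      have h2 := UInt32.le_iff_toNat_le.mp h.2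
      have h3 : c.toNat = c.val.toNat := rfl
      have h4 : ('A').val.toNat = 65 := by decide
      have h5 : ('Z').val.toNat = 90 := by decide
      omega
    apply pv_isupper_false_of_gt
    rw [Char.toNat_ofNat, if_pos (Or.inl (by omega))]
    omega
  · rw [if_neg h]
    exact Bool.eq_false_iff.mpr h

-- every character of month.lower() fails isupper
theorem pv_lower_no_upper (s : String) : ∀ c ∈ (PySem.Str.lower s).toList, PySem.Chars.isupper c = false := by
  intro c hc
  rw [PySem.Str.toList_lower] at hc
  simp only [PySem.Chars.lower, List.mem_map] at hc
  obtain ⟨d, _, hd⟩ := hc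
  rw [← hd]
  exact pv_lowerChar_not_upper d

-- the folded dictionaries are these literal tables
set_option maxHeartbeats 2000000 in
theorem pv_dicA_eq : pvDicA = PySem.Dict.mk [("January","01"), ("February","02"), ("March","03"), ("April","04"), ("May","05"), ("June","06"), ("July","07"), ("August","08"), ("September","09"), ("October","10"), ("November","11"), ("December","12"), ("january","01"), ("february","02"), ("march","03"), ("april","04"), ("may","05"), ("june","06"), ("july","07"), ("august","08"), ("september","09"), ("october","10"), ("november","11"), ("december","12")] := by decide
set_option maxHeartbeats 2000000 in
theorem pv_dic2A_eq : pvDic2A = PySem.Dict.mk [("Jan","01"), ("Feb","02"), ("Mar","03"), ("Apr","04"), ("May","05"), ("Jun","06"), ("Jul","07"), ("Aug","08"), ("Sep","09"), ("Oct","10"), ("Nov","11"), ("Dec","12"), ("jan","01"), ("feb","02"), ("mar","03"), ("apr","04"), ("may","05"), ("jun","06"), ("jul","07"), ("aug","08"), ("sep","09"), ("oct","10"), ("nov","11"), ("dec","12")] := by decide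

theorem pv_enum_eq : PySem.List.enumerate pvMonths 0 = [((0 : Int), "January"), ((1 : Int), "February"), ((2 : Int), "March"), ((3 : Int), "April"), ((4 : Int), "May"), ((5 : Int), "June"), ((6 : Int), "July"), ((7 : Int), "August"), ((8 : Int), "September"), ((9 : Int), "October"), ((10 : Int), "November"), ((11 : Int), "December")] := by decide

-- core: on a string without uppercase ASCII characters the two lookups agree
set_option maxHeartbeats 4000000 in
theorem pv_month1_eq (m : String) (hm : ∀ c ∈ m.toList, PySem.Chars.isupper c = false) :
    (match (match pvDicA.get? m with
            | none => pvDic2A.get? m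
            | some v => some v) with
     | none => "01"
     | some v => v) = pvScan m (PySem.List.enumerate pvMonths 0) := by
  have hne0 : m ≠ "January" := fun e => absurd (hm 'J' (by rw [e]; decide)) (by decide)
  have hne1 : m ≠ "February" := fun e => absurd (hm 'F' (by rw [e]; decide)) (by decide)
  have hne2 : m ≠ "March" := fun e => absurd (hm 'M' (by rw [e]; decide)) (by decide)
  have hne3 : m ≠ "April" := fun e => absurd (hm 'A' (by rw [e]; decide)) (by decide)
  have hne4 : m ≠ "May" := fun e => absurd (hm 'M' (by rw [e]; decide)) (by decide)
  have hne5 : m ≠ "June" := fun e => absurd (hm 'J' (by rw [e]; decide)) (by decide)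
  have hne6 : m ≠ "July" := fun e => absurd (hm 'J' (by rw [e]; decide)) (by decide)
  have hne7 : m ≠ "August" := fun e => absurd (hm 'A' (by rw [e]; decide)) (by decide)
  have hne8 : m ≠ "September" := fun e => absurd (hm 'S' (by rw [e]; decide)) (by decide)
  have hne9 : m ≠ "October" := fun e => absurd (hm 'O' (by rw [e]; decide)) (by decide)
  have hne10 : m ≠ "November" := fun e => absurd (hm 'N' (by rw [e]; decide)) (by decide)
  have hne11 : m ≠ "December" := fun e => absurd (hm 'D' (by rw [e]; decide)) (by decide)
  have hne12 : m ≠ "Jan" := fun e => absurd (hm 'J' (by rw [e]; decide)) (by decide)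
  have hne13 : m ≠ "Feb" := fun e => absurd (hm 'F' (by rw [e]; decide)) (by decide)
  have hne14 : m ≠ "Mar" := fun e => absurd (hm 'M' (by rw [e]; decide)) (by decide)
  have hne15 : m ≠ "Apr" := fun e => absurd (hm 'A' (by rw [e]; decide)) (by decide)
  have hne16 : m ≠ "May" := fun e => absurd (hm 'M' (by rw [e]; decide)) (by decide)
  have hne17 : m ≠ "Jun" := fun e => absurd (hm 'J' (by rw [e]; decide)) (by decide)
  have hne18 : m ≠ "Jul" := fun e => absurd (hm 'J' (by rw [e]; decide)) (by decide)
  have hne19 : m ≠ "Aug" := fun e => absurd (hm 'A' (by rw [e]; decide)) (by decide)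
  have hne20 : m ≠ "Sep" := fun e => absurd (hm 'S' (by rw [e]; decide)) (by decide)
  have hne21 : m ≠ "Oct" := fun e => absurd (hm 'O' (by rw [e]; decide)) (by decide)
  have hne22 : m ≠ "Nov" := fun e => absurd (hm 'N' (by rw [e]; decide)) (by decide)
  have hne23 : m ≠ "Dec" := fun e => absurd (hm 'D' (by rw [e]; decide)) (by decide)
  have hl0 : PySem.Str.lower "January" = "january" := by decide
  have ha0 : PySem.Str.lower (PySem.Str.slice "January" none (some 3)) = "jan" := by decide
  have hz0 : PySem.Str.zfill (PySem.Int.toStr ((0 : Int) + 1)) 2 = "01" := by decide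
  have hl1 : PySem.Str.lower "February" = "february" := by decide
  have ha1 : PySem.Str.lower (PySem.Str.slice "February" none (some 3)) = "feb" := by decide
  have hz1 : PySem.Str.zfill (PySem.Int.toStr ((1 : Int) + 1)) 2 = "02" := by decide
  have hl2 : PySem.Str.lower "March" = "march" := by decide
  have ha2 : PySem.Str.lower (PySem.Str.slice "March" none (some 3)) = "mar" := by decide
  have hz2 : PySem.Str.zfill (PySem.Int.toStr ((2 : Int) + 1)) 2 = "03" := by decide
  have hl3 : PySem.Str.lower "April" = "april" := by decide
  have ha3 : PySem.Str.lower (PySem.Str.slice "April" none (some 3)) = "apr" := by decide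
  have hz3 : PySem.Str.zfill (PySem.Int.toStr ((3 : Int) + 1)) 2 = "04" := by decide
  have hl4 : PySem.Str.lower "May" = "may" := by decide
  have ha4 : PySem.Str.lower (PySem.Str.slice "May" none (some 3)) = "may" := by decide
  have hz4 : PySem.Str.zfill (PySem.Int.toStr ((4 : Int) + 1)) 2 = "05" := by decide
  have hl5 : PySem.Str.lower "June" = "june" := by decide
  have ha5 : PySem.Str.lower (PySem.Str.slice "June" none (some 3)) = "jun" := by decide
  have hz5 : PySem.Str.zfill (PySem.Int.toStr ((5 : Int) + 1)) 2 = "06" := by decide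
  have hl6 : PySem.Str.lower "July" = "july" := by decide
  have ha6 : PySem.Str.lower (PySem.Str.slice "July" none (some 3)) = "jul" := by decide
  have hz6 : PySem.Str.zfill (PySem.Int.toStr ((6 : Int) + 1)) 2 = "07" := by decide
  have hl7 : PySem.Str.lower "August" = "august" := by decide
  have ha7 : PySem.Str.lower (PySem.Str.slice "August" none (some 3)) = "aug" := by decide
  have hz7 : PySem.Str.zfill (PySem.Int.toStr ((7 : Int) + 1)) 2 = "08" := by decide
  have hl8 : PySem.Str.lower "September" = "september" := by decide
  have ha8 : PySem.Str.lower (PySem.Str.slice "September" none (some 3)) = "sep" := by decide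
  have hz8 : PySem.Str.zfill (PySem.Int.toStr ((8 : Int) + 1)) 2 = "09" := by decide
  have hl9 : PySem.Str.lower "October" = "october" := by decide
  have ha9 : PySem.Str.lower (PySem.Str.slice "October" none (some 3)) = "oct" := by decide
  have hz9 : PySem.Str.zfill (PySem.Int.toStr ((9 : Int) + 1)) 2 = "10" := by decide
  have hl10 : PySem.Str.lower "November" = "november" := by decide
  have ha10 : PySem.Str.lower (PySem.Str.slice "November" none (some 3)) = "nov" := by decide
  have hz10 : PySem.Str.zfill (PySem.Int.toStr ((10 : Int) + 1)) 2 = "11" := by decide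
  have hl11 : PySem.Str.lower "December" = "december" := by decide
  have ha11 : PySem.Str.lower (PySem.Str.slice "December" none (some 3)) = "dec" := by decide
  have hz11 : PySem.Str.zfill (PySem.Int.toStr ((11 : Int) + 1)) 2 = "12" := by decide
  rw [pv_dicA_eq, pv_dic2A_eq, pv_enum_eq]
  simp only [PySem.Dict.get?_mk_cons, beq_iff_eq, pvScan,
    hl0, ha0, hz0, hl1, ha1, hz1, hl2, ha2, hz2, hl3, ha3, hz3, hl4, ha4, hz4, hl5, ha5, hz5, hl6, ha6, hz6, hl7, ha7, hz7, hl8, ha8, hz8, hl9, ha9, hz9, hl10, ha10, hz10, hl11, ha11, hz11,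
    if_neg (Ne.symm hne0)]
  simp only [if_neg (Ne.symm hne1), if_neg (Ne.symm hne2), if_neg (Ne.symm hne3),
    if_neg (Ne.symm hne4), if_neg (Ne.symm hne5), if_neg (Ne.symm hne6), if_neg (Ne.symm hne7),
    if_neg (Ne.symm hne8), if_neg (Ne.symm hne9), if_neg (Ne.symm hne10), if_neg (Ne.symm hne11),
    if_neg (Ne.symm hne12), if_neg (Ne.symm hne13), if_neg (Ne.symm hne14), if_neg (Ne.symm hne15),
    if_neg (Ne.symm hne17), if_neg (Ne.symm hne18), if_neg (Ne.symm hne19),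
    if_neg (Ne.symm hne20), if_neg (Ne.symm hne21), if_neg (Ne.symm hne22), if_neg (Ne.symm hne23)]
  by_cases g0 : m = "january"
  · subst g0; decide
  by_cases g1 : m = "february"
  · subst g1; decide
  by_cases g2 : m = "march"
  · subst g2; decide
  by_cases g3 : m = "april"
  · subst g3; decide
  by_cases g4 : m = "may"
  · subst g4; decide
  by_cases g5 : m = "june"
  · subst g5; decide
  by_cases g6 : m = "july"
  · subst g6; decide
  by_cases g7 : m = "august"
  · subst g7; decide
  by_cases g8 : m = "september"
  · subst g8; decide
  by_cases g9 : m = "october"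
  · subst g9; decide
  by_cases g10 : m = "november"
  · subst g10; decide
  by_cases g11 : m = "december"
  · subst g11; decide
  by_cases g12 : m = "jan"
  · subst g12; decide
  by_cases g13 : m = "feb"
  · subst g13; decide
  by_cases g14 : m = "mar"
  · subst g14; decide
  by_cases g15 : m = "apr"
  · subst g15; decide
  by_cases g17 : m = "jun"
  · subst g17; decide
  by_cases g18 : m = "jul"
  · subst g18; decide
  by_cases g19 : m = "aug"
  · subst g19; decide
  by_cases g20 : m = "sep"
  · subst g20; decide
  by_cases g21 : m = "oct"
  · subst g21; decide
  by_cases g22 : m = "nov"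
  · subst g22; decide
  by_cases g23 : m = "dec"
  · subst g23; decide
  simp [g0, Ne.symm g0, g1, Ne.symm g1, g2, Ne.symm g2, g3, Ne.symm g3, g4, Ne.symm g4, g5, Ne.symm g5, g6, Ne.symm g6, g7, Ne.symm g7, g8, Ne.symm g8, g9, Ne.symm g9, g10, Ne.symm g10, g11, Ne.symm g11, g12, Ne.symm g12, g13, Ne.symm g13, g14, Ne.symm g14, g15, Ne.symm g15, g17, Ne.symm g17, g18, Ne.symm g18, g19, Ne.symm g19, g20, Ne.symm g20, g21, Ne.symm g21, g22, Ne.symm g22, g23, Ne.symm g23, PySem.Dict.get?]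

-- ===== VERDICT (by name: the statement is the Claim_ definition above) =====
theorem transformDate_spec : Claim_equal_transformDate := by
  intro day month year _
  unfold Spec_transformDate transformDate transformDate_alt
  have h := pv_month1_eq (PySem.Str.lower month) (pv_lower_no_upper month)
  simp only []
  rw [h]
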